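-- pv_equiv track=rewrite | github.com/omkarsk98/building-ai | Chapter2/Probability/FlipTheCoin(adv).py | count
-- ===== SOURCE A (Python) =====
-- def count(seq):
--     cnt = 0
--     for i in range(0, len(seq) - 4):
--         matched = True
--         for j in range(i, i + 5):
--             if seq[j] == 0:
--                 matched = False
--                 break
--         if matched:
--             cnt += 1
--     return cnt
-- ===== SOURCE B (Python) =====
-- def count(seq):
--     cnt = 0
--     run = 0
--     for x in seq:
--         if x == 0:
--             run = 0
--         else:
--             run += 1
--             if run >= 5:
--                 cnt += 1
--     return cnt
-- ===== Notes on version B (the rewrite author's own statement) =====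
-- stated objective: simpler
-- what changed: Replaced the nested scan over all 5-element windows by a single pass maintaining a run-length counter of consecutive nonzero elements, adding 1 whenever the run reaches 5.
import Mathlib
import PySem

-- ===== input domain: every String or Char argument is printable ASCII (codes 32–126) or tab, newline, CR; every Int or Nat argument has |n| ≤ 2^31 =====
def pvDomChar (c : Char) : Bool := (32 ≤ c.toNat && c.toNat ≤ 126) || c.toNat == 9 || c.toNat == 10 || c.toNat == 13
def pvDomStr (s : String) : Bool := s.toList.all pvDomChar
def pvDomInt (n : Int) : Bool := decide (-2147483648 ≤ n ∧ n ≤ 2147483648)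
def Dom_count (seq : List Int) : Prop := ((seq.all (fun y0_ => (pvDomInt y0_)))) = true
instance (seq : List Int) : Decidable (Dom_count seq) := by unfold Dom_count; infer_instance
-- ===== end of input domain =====

-- B is a single pass keeping a run-length counter instead of re-checking 5 elements per window (objective: simpler).

-- ===== PORT A =====
-- inner 'for j in range(i, i+5)' loop with its break: returns the final value of 'matched'
-- (seq[j] is always in range when called from `count`, so pyGetD is exact there)
def countInner (seq : List Int) : List Int → Bool
  | [] => true
  | j :: js => if PySem.List.pyGetD seq j 0 == 0 then false else countInner seq js

def count (seq : List Int) : Int :=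
  (PySem.List.pyRange 0 ((seq.length : Int) - 4) 1).foldl
    (fun cnt i => if countInner seq (PySem.List.pyRange i (i + 5) 1) then cnt + 1 else cnt) 0

-- ===== PORT B =====
def count_alt (seq : List Int) : Int :=
  (seq.foldl
    (fun (st : Int × Int) x =>
      if x == 0 then (0, st.2)
      else (st.1 + 1, if st.1 + 1 ≥ 5 then st.2 + 1 else st.2))
    (0, 0)).2

-- ===== PRECONDITION & SPEC =====
def Spec_count (seq : List Int) (out : Int) : Prop := out = count_alt seq
instance (seq : List Int) (out : Int) : Decidable (Spec_count seq out) := by unfold Spec_count; infer_instance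

-- ===== CLAIM (what is proved, stated in full; the proofs are below) =====
def Claim_equal_count : Prop := ∀ (seq : List Int), Dom_count seq → Spec_count seq (count seq)

-- ===== LEMMAS AND PROOFS =====

-- length of the maximal trailing run of nonzero elements
def runLen (xs : List Int) : Int := ((xs.reverse.takeWhile (fun y => !(y == 0))).length : Int)

theorem runLen_nonneg (xs : List Int) : 0 ≤ runLen xs := by
  simp [runLen]

theorem runLen_le (xs : List Int) : runLen xs ≤ (xs.length : Int) := by
  have h := (List.takeWhile_sublist (p := fun y : Int => !(y == 0)) (l := xs.reverse)).length_le
  rw [List.length_reverse] at h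
  simp [runLen]
  omega

theorem runLen_append (xs : List Int) (x : Int) :
    runLen (xs ++ [x]) = if x == 0 then 0 else runLen xs + 1 := by
  by_cases hx : x = 0
  · simp [runLen, hx]
  · simp [runLen, List.takeWhile_cons, hx]

theorem range5 (i : Int) : PySem.List.pyRange i (i + 5) 1 = [i, i+1, i+2, i+3, i+4] := by
  rw [PySem.List.pyRange_one]
  have h5 : (i + 5 - i).toNat = 5 := by omega
  rw [h5]
  simp [List.range_succ]

theorem pyGetD_append_lt (xs : List Int) (x : Int) (j : Int) (h0 : 0 ≤ j) (h : j < (xs.length : Int)) :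
    PySem.List.pyGetD (xs ++ [x]) j 0 = PySem.List.pyGetD xs j 0 := by
  rw [PySem.List.pyGetD_eq_getElem _ _ h0 (by simp; omega),
      PySem.List.pyGetD_eq_getElem _ _ h0 (by omega)]
  exact List.getElem_append_left (by omega)

theorem countInner_congr (s t : List Int) (l : List Int)
    (h : ∀ j ∈ l, PySem.List.pyGetD s j 0 = PySem.List.pyGetD t j 0) :
    countInner s l = countInner t l := by
  induction l with
  | nil => rfl
  | cons j js ih =>
    have hj := h j (by simp)
    simp only [countInner, hj]
    split
    · rfl
    · exact ih (fun k hk => h k (by simp [hk]))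

-- windows entirely inside xs are unchanged by appending x
theorem count_prefix (xs : List Int) (x : Int) :
    (PySem.List.pyRange 0 ((xs.length : Int) - 4) 1).foldl
      (fun cnt i => if countInner (xs ++ [x]) (PySem.List.pyRange i (i + 5) 1) then cnt + 1 else cnt) 0
    = count xs := by
  unfold count
  apply PySem.List.foldl_congr_mem
  intro cnt i hi
  have hmem : (0:Int) ≤ i ∧ i < (xs.length : Int) - 4 := by
    have := (PySem.List.mem_pyRange_one).1 hi
    exact this
  have : countInner (xs ++ [x]) (PySem.List.pyRange i (i + 5) 1)
       = countInner xs (PySem.List.pyRange i (i + 5) 1) := by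
    apply countInner_congr
    intro j hj
    have hjr := (PySem.List.mem_pyRange_one).1 hj
    exact pyGetD_append_lt xs x j (by omega) (by omega)
  rw [this]

-- the new window (ending at the appended element) is all-nonzero iff x ≠ 0 and the trailing run of xs has length ≥ 4
theorem pyGetD_append_nat (u w : List Int) (k : Nat) :
    PySem.List.pyGetD (u ++ w) ((u.length : Int) + k) 0 = w.getD k 0 := by
  have h : ((u.length : Int) + k) = ((u.length + k : Nat) : Int) := by push_cast; ring
  rw [h, PySem.List.pyGetD_natCast]
  simp [List.getD_eq_getElem?_getD, List.getElem?_append_right (Nat.le_add_right _ _)]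

theorem runLen_ge4_iff (u : List Int) (d c b a : Int) :
    (4 ≤ runLen (u ++ [d, c, b, a])) ↔ (a ≠ 0 ∧ b ≠ 0 ∧ c ≠ 0 ∧ d ≠ 0) := by
  have hrev : (u ++ [d, c, b, a]).reverse = a :: b :: c :: d :: u.reverse := by simp
  by_cases ha : a = 0 <;> by_cases hb : b = 0 <;> by_cases hc : c = 0 <;> by_cases hd : d = 0 <;>
    simp [runLen, hrev, ha, hb, hc, hd] <;> omega

theorem countInner_last (xs : List Int) (x : Int) (h : 4 ≤ xs.length) :
    countInner (xs ++ [x]) (PySem.List.pyRange ((xs.length : Int) - 4) ((xs.length : Int) - 4 + 5) 1)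
    = (!(x == 0) && decide (4 ≤ runLen xs)) := by
  obtain ⟨u, v, huv, hv⟩ : ∃ u v, xs = u ++ v ∧ v.length = 4 :=
    ⟨xs.take (xs.length - 4), xs.drop (xs.length - 4), (List.take_append_drop _ _).symm,
      by simp; omega⟩
  match v, hv with
  | [d, c, b, a], _ =>
  subst huv
  have hu : ((u ++ [d, c, b, a]).length : Int) - 4 = (u.length : Int) := by simp
  have hx5 : u ++ [d, c, b, a] ++ [x] = u ++ [d, c, b, a, x] := by simp
  rw [hu, hx5, range5]
  have g0 : PySem.List.pyGetD (u ++ [d, c, b, a, x]) (u.length : Int) 0 = d := by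
    simpa using pyGetD_append_nat u [d, c, b, a, x] 0
  have g1 : PySem.List.pyGetD (u ++ [d, c, b, a, x]) ((u.length : Int) + 1) 0 = c := by
    simpa using pyGetD_append_nat u [d, c, b, a, x] 1
  have g2 : PySem.List.pyGetD (u ++ [d, c, b, a, x]) ((u.length : Int) + 2) 0 = b := by
    simpa using pyGetD_append_nat u [d, c, b, a, x] 2
  have g3 : PySem.List.pyGetD (u ++ [d, c, b, a, x]) ((u.length : Int) + 3) 0 = a := by
    simpa using pyGetD_append_nat u [d, c, b, a, x] 3
  have g4 : PySem.List.pyGetD (u ++ [d, c, b, a, x]) ((u.length : Int) + 4) 0 = x := by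
    simpa using pyGetD_append_nat u [d, c, b, a, x] 4
  simp only [countInner, g0, g1, g2, g3, g4]
  by_cases hd : d = 0 <;> by_cases hc : c = 0 <;> by_cases hb : b = 0 <;> by_cases ha : a = 0 <;>
    simp [runLen_ge4_iff, hd, hc, hb, ha] <;> rfl

theorem count_short (xs : List Int) (h : xs.length ≤ 4) : count xs = 0 := by
  unfold count
  rw [PySem.List.pyRange_one_eq_nil (by omega)]
  rfl

theorem count_append (xs : List Int) (x : Int) :
    count (xs ++ [x]) = count xs + (if x == 0 then 0 else if runLen xs + 1 ≥ 5 then 1 else 0) := by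
  have hrl := runLen_le xs
  have hrn := runLen_nonneg xs
  by_cases h4 : xs.length ≤ 3
  · rw [count_short (xs ++ [x]) (by simp; omega), count_short xs (by omega)]
    split_ifs <;> omega
  · conv_lhs => unfold count
    have hlen : (((xs ++ [x]).length : Int)) - 4 = ((xs.length : Int) - 4) + 1 := by
      simp; ring
    rw [hlen, PySem.List.pyRange_one_succ_right (by omega), List.foldl_append]
    rw [count_prefix xs x]
    simp only [List.foldl_cons, List.foldl_nil]
    rw [show ((xs.length : Int) - 4) + 5 = ((xs.length : Int) - 4) + 5 from rfl]
    rw [countInner_last xs x (by omega)]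
    by_cases hx : x = 0
    · simp [hx]
    · by_cases hr : 4 ≤ runLen xs
      · simp [hx, hr]
        omega
      · simp [hx, hr]
        omega

theorem fold_inv (xs : List Int) :
    xs.foldl
      (fun (st : Int × Int) x =>
        if x == 0 then (0, st.2)
        else (st.1 + 1, if st.1 + 1 ≥ 5 then st.2 + 1 else st.2))
      (0, 0)
    = (runLen xs, count xs) := by
  induction xs using List.reverseRecOn with
  | nil => simp [runLen, count_short]
  | append_singleton xs x ih =>
    rw [List.foldl_append, ih]
    simp only [List.foldl_cons, List.foldl_nil]
    rw [runLen_append, count_append]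
    by_cases hx : x = 0
    · simp [hx]
    · simp only [hx, beq_iff_eq, if_false, ge_iff_le]
      refine Prod.ext rfl ?_
      simp only
      split_ifs <;> omega

-- ===== VERDICT (by name: the statement is the Claim_ definition above) =====
theorem count_spec : Claim_equal_count := by
  intro seq _
  unfold Spec_count count_alt
  rw [fold_inv]
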